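-- pv_equiv track=rewrite | github.com/DendroGen/capyme | server/process/llm_funcs/history_utils.py | visible_index_to_real_index
-- ===== SOURCE A (Python) =====
-- from typing import Any, Dict, List
--
-- def visible_index_to_real_index(
--     history: List[Dict[str, Any]], visible_index: int
-- ) -> int:
--     visible_counter = -1
--
--     for real_index, item in enumerate(history):
--         if item.get("role") == "system":
--             continue
--
--         visible_counter += 1
--         if visible_counter == visible_index:
--             return real_index
--
--     raise IndexError("Visible history index out of range")
-- ===== SOURCE B (Python) =====
-- def visible_index_to_real_index(history, visible_index):
--     # Stage 1: prefix sums: prefix[k] = number of non-system items in history[:k].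
--     prefix = [0]
--     c = 0
--     for item in history:
--         c += item.get("role") != "system"
--         prefix.append(c)
--     if not 0 <= visible_index < c:
--         raise IndexError("Visible history index out of range")
--     # Stage 2: binary search for the smallest real index r with prefix[r + 1] >= visible_index + 1.
--     lo, hi = 0, len(history) - 1
--     while lo < hi:
--         mid = (lo + hi) // 2
--         if prefix[mid + 1] >= visible_index + 1:
--             hi = mid
--         else:
--             lo = mid + 1
--     return lo
-- ===== Notes on version B (the rewrite author's own statement) =====
-- stated objective: alternative
-- what changed: Replaces the counting scan with early return by a two-stage algorithm: precompute the prefix-sum table of visible-item counts, range-check against the total, then binary-search the table for the smallest real index whose prefix count reaches visible_index+1.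
import Mathlib
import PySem

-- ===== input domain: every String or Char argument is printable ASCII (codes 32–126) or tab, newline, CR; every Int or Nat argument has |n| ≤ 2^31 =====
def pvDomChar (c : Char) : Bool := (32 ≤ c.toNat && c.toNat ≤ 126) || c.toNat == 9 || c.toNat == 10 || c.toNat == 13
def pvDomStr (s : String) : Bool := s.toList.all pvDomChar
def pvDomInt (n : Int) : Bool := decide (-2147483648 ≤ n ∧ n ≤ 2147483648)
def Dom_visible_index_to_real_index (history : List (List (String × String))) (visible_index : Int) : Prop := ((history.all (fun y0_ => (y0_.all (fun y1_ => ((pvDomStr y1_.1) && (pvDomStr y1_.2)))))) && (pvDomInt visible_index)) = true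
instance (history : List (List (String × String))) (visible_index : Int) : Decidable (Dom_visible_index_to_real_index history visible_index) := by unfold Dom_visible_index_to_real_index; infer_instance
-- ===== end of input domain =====

-- B is a different algorithm: a prefix-sum table of visible counts plus a binary search,
-- instead of A's counting scan with an early return. Both raise IndexError outside Pre_;
-- there the ports return -1 (nothing is claimed there).

-- ===== PORT A =====
-- item.get("role") on an association list, via PySem.Dict first-match lookup (exact)
def pvRoleGet (item : List (String × String)) : Option String := (PySem.Dict.mk item).get? "role"

-- the for-loop over enumerate(history) with the mutable visible_counter, early return on match
def pvAGo (items : List (Int × List (String × String))) (visible_counter visible_index : Int) : Int :=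
  match items with
  | [] => -1  -- Python: raise IndexError("Visible history index out of range")
  | (real_index, item) :: rest =>
    if pvRoleGet item = some "system" then
      pvAGo rest visible_counter visible_index
    else if visible_counter + 1 = visible_index then real_index
    else pvAGo rest (visible_counter + 1) visible_index

def visible_index_to_real_index (history : List (List (String × String))) (visible_index : Int) : Int :=
  pvAGo (PySem.List.enumerate history 0) (-1) visible_index

-- ===== PORT B =====
-- Stage 1: prefix = [0]; c = 0; for item in history: c += item.get("role") != "system"; prefix.append(c)
def pvPrefix (history : List (List (String × String))) : List Int × Int :=
  history.foldl (fun s item =>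
    let c := s.2 + (if pvRoleGet item ≠ some "system" then 1 else 0)
    (s.1 ++ [c], c)) ([0], 0)

-- Stage 2: the while lo < hi binary search; prefix[mid+1] is in range whenever Pre_ holds.
-- The loop is ported with a fuel counter (len(history) steps suffice, proved in pvBS_least);
-- this only makes the same computation structurally total.
def pvBS (pfx : List Int) (visible_index : Int) : Nat → Int → Int → Int
  | 0, lo, _ => lo
  | fuel + 1, lo, hi =>
    if lo < hi then
      let mid := PySem.Int.floordiv (lo + hi) 2
      if visible_index + 1 ≤ (PySem.List.pyGet? pfx (mid + 1)).getD 0 then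
        pvBS pfx visible_index fuel lo mid
      else
        pvBS pfx visible_index fuel (mid + 1) hi
    else lo

def visible_index_to_real_index_alt (history : List (List (String × String))) (visible_index : Int) : Int :=
  let p := pvPrefix history
  if ¬ (0 ≤ visible_index ∧ visible_index < p.2) then
    -1  -- Python: raise IndexError("Visible history index out of range")
  else
    pvBS p.1 visible_index history.length 0 ((history.length : Int) - 1)

-- ===== PRECONDITION & SPEC =====
-- Pre_ = exactly the inputs where A returns normally: visible_index addresses an existing non-system item.
def Pre_visible_index_to_real_index (history : List (List (String × String))) (visible_index : Int) : Prop :=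
  0 ≤ visible_index ∧
  visible_index < ((history.filter (fun item => pvRoleGet item ≠ some "system")).length : Int)
instance (history : List (List (String × String))) (visible_index : Int) : Decidable (Pre_visible_index_to_real_index history visible_index) := by unfold Pre_visible_index_to_real_index; infer_instance

def pvWitness_visible_index_to_real_index : (List (List (String × String))) × Int :=
  ([[("role", "system"), ("content", "s")], [("role", "user"), ("content", "hi")]], 0)

def Spec_visible_index_to_real_index (history : List (List (String × String))) (visible_index : Int) (out : Int) : Prop := out = visible_index_to_real_index_alt history visible_index
instance (history : List (List (String × String))) (visible_index : Int) (out : Int) : Decidable (Spec_visible_index_to_real_index history visible_index out) := by unfold Spec_visible_index_to_real_index; infer_instance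

-- ===== CLAIM =====
def Claim_equal_visible_index_to_real_index : Prop := ∀ (history : List (List (String × String))) (visible_index : Int), Dom_visible_index_to_real_index history visible_index → Pre_visible_index_to_real_index history visible_index → Spec_visible_index_to_real_index history visible_index (visible_index_to_real_index history visible_index)

-- ===== LEMMAS AND PROOFS =====

-- number of visible items among the first k
def pvCnt (history : List (List (String × String))) (k : Nat) : Int :=
  (((history.take k).filter (fun item => pvRoleGet item ≠ some "system")).length : Int)

-- the visible-index table of the suffix starting at real index s (proof device)
def pvVisFrom (history : List (List (String × String))) (s : Int) : List Int :=
  ((PySem.List.enumerate history s).filter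
      (fun p => pvRoleGet p.2 ≠ some "system")).map (fun p => p.1)

theorem pvVisFrom_nil (s : Int) : pvVisFrom [] s = [] := by
  simp [pvVisFrom, PySem.List.enumerate_nil]

theorem pvVisFrom_cons (item : List (String × String)) (rest : List (List (String × String))) (s : Int) :
    pvVisFrom (item :: rest) s =
      if pvRoleGet item = some "system" then pvVisFrom rest (s + 1)
      else s :: pvVisFrom rest (s + 1) := by
  by_cases hsys : pvRoleGet item = some "system" <;>
    simp [pvVisFrom, PySem.List.enumerate_cons, hsys]

theorem pvVisFrom_length (history : List (List (String × String))) (s : Int) :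
    (pvVisFrom history s).length =
      (history.filter (fun item => pvRoleGet item ≠ some "system")).length := by
  induction history generalizing s with
  | nil => simp [pvVisFrom_nil]
  | cons item rest ih =>
    rw [pvVisFrom_cons, List.filter_cons]
    by_cases hsys : pvRoleGet item = some "system" <;> simp [hsys, ih]

-- A's loop returns the vi-th entry of the visible-index table
theorem pvAGo_eq (history : List (List (String × String))) (s c vi : Int)
    (hc : c < vi) (hlt : vi - c - 1 < ((pvVisFrom history s).length : Int)) :
    pvAGo (PySem.List.enumerate history s) c vi = (pvVisFrom history s).getD (vi - c - 1).toNat 0 := by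
  induction history generalizing s c with
  | nil => simp [pvVisFrom_nil] at hlt; omega
  | cons item rest ih =>
    rw [PySem.List.enumerate_cons]
    rw [pvVisFrom_cons] at hlt ⊢
    by_cases hsys : pvRoleGet item = some "system"
    · simp only [hsys, if_pos] at hlt ⊢
      simp only [pvAGo, hsys]
      exact ih (s + 1) c hc (by simpa using hlt)
    · simp only [hsys] at hlt ⊢
      simp only [pvAGo, hsys]
      by_cases hmatch : c + 1 = vi
      · have : (vi - c - 1).toNat = 0 := by omega
        simp [hmatch, this]
      · have hc' : c + 1 < vi := by omega
        have hstep : (vi - c - 1).toNat = (vi - (c + 1) - 1).toNat + 1 := by omega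
        simp only [if_neg hmatch, hstep]
        exact ih (s + 1) (c + 1) hc' (by simp at hlt ⊢; omega)

-- basic pvCnt facts
theorem pvCnt_zero (history : List (List (String × String))) : pvCnt history 0 = 0 := by
  simp [pvCnt]

theorem pvCnt_cons_succ (item : List (String × String)) (rest : List (List (String × String))) (k : Nat) :
    pvCnt (item :: rest) (k + 1) =
      (if pvRoleGet item ≠ some "system" then 1 else 0) + pvCnt rest k := by
  by_cases hsys : pvRoleGet item = some "system"
  · simp [pvCnt, hsys]
  · simp [pvCnt, hsys]; omega

theorem pvCnt_mono (history : List (List (String × String))) {k k' : Nat} (h : k ≤ k') :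
    pvCnt history k ≤ pvCnt history k' := by
  induction history generalizing k k' with
  | nil => simp [pvCnt]
  | cons item rest ih =>
    cases k with
    | zero =>
      have : (0 : Int) ≤ pvCnt (item :: rest) k' := by
        simp [pvCnt]
      simpa [pvCnt_zero] using this
    | succ k =>
      cases k' with
      | zero => omega
      | succ k' =>
        rw [pvCnt_cons_succ, pvCnt_cons_succ]
        have := ih (k := k) (k' := k') (by omega)
        omega

-- main characterisation: the j-th visible real index r satisfies pvCnt (r-s) = j and pvCnt (r-s+1) = j+1
theorem pvVis_main (history : List (List (String × String))) (s : Int) (j : Nat)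
    (hj : j < (pvVisFrom history s).length) :
    s ≤ (pvVisFrom history s).getD j 0 ∧
    (pvVisFrom history s).getD j 0 < s + history.length ∧
    pvCnt history ((pvVisFrom history s).getD j 0 - s).toNat = (j : Int) ∧
    pvCnt history (((pvVisFrom history s).getD j 0 - s).toNat + 1) = (j : Int) + 1 := by
  induction history generalizing s j with
  | nil => simp [pvVisFrom_nil] at hj
  | cons item rest ih =>
    rw [pvVisFrom_cons] at hj ⊢
    by_cases hsys : pvRoleGet item = some "system"
    · simp only [hsys, if_pos] at hj ⊢
      obtain ⟨h1, h2, h3, h4⟩ := ih (s + 1) j (by simpa using hj)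
      set r := (pvVisFrom rest (s + 1)).getD j 0 with hr
      have e1 : (r - s).toNat = (r - (s + 1)).toNat + 1 := by omega
      have e2 : (r - s).toNat + 1 = ((r - (s + 1)).toNat + 1) + 1 := by omega
      refine ⟨by omega, by simp; omega, ?_, ?_⟩
      · rw [e1, pvCnt_cons_succ]; simp [hsys]; omega
      · rw [e2, pvCnt_cons_succ]; simp [hsys]; omega
    · simp only [hsys, reduceIte] at hj ⊢
      cases j with
      | zero =>
        simp only [List.getD_cons_zero]
        refine ⟨le_refl s, by simp, ?_, ?_⟩
        · simp [pvCnt_zero]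
        · have : (s - s).toNat + 1 = 0 + 1 := by omega
          rw [this, pvCnt_cons_succ]
          simp [hsys, pvCnt_zero]
      | succ j =>
        simp only [List.getD_cons_succ]
        obtain ⟨h1, h2, h3, h4⟩ := ih (s + 1) j (by simpa using hj)
        set r := (pvVisFrom rest (s + 1)).getD j 0 with hr
        have e1 : (r - s).toNat = (r - (s + 1)).toNat + 1 := by omega
        have e2 : (r - s).toNat + 1 = ((r - (s + 1)).toNat + 1) + 1 := by omega
        refine ⟨by omega, by simp; omega, ?_, ?_⟩
        · rw [e1, pvCnt_cons_succ]; simp [hsys]; omega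
        · rw [e2, pvCnt_cons_succ]; simp [hsys]; omega

-- the prefix-sum fold builds exactly the table of pvCnt values
theorem pvPrefix_fold (history : List (List (String × String))) (P : List Int) (c : Int) :
    history.foldl (fun s item =>
        let c := s.2 + (if pvRoleGet item ≠ some "system" then 1 else 0)
        (s.1 ++ [c], c)) (P, c) =
      (P ++ (List.range history.length).map (fun t => c + pvCnt history (t + 1)),
       c + pvCnt history history.length) := by
  induction history generalizing P c with
  | nil => simp [pvCnt_zero]
  | cons item rest ih =>
    simp only [List.foldl_cons]
    rw [ih]
    simp only [Prod.mk.injEq]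
    refine ⟨?_, ?_⟩
    · rw [List.append_assoc]
      congr 1
      rw [List.length_cons, List.range_succ_eq_map]
      simp only [List.map_cons, List.map_map, List.singleton_append]
      congr 1
      · rw [pvCnt_cons_succ, pvCnt_zero]; ring
      · apply List.map_congr_left
        intro t _
        simp only [Function.comp_apply]
        rw [pvCnt_cons_succ]
        ring
    · rw [List.length_cons, pvCnt_cons_succ]; ring

theorem pvPrefix_spec (history : List (List (String × String))) :
    pvPrefix history =
      ((List.range (history.length + 1)).map (fun m => pvCnt history m),
       pvCnt history history.length) := by
  rw [pvPrefix, pvPrefix_fold]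
  simp only [Prod.mk.injEq]
  refine ⟨?_, by simp⟩
  rw [List.range_succ_eq_map]
  simp [List.map_map, pvCnt_zero]

-- looking up the prefix table
theorem pvPrefix_get (history : List (List (String × String))) (m : Int)
    (h0 : 0 ≤ m) (hm : m ≤ (history.length : Int)) :
    (PySem.List.pyGet? (pvPrefix history).1 m).getD 0 = pvCnt history m.toNat := by
  rw [pvPrefix_spec]
  have hm' : m.toNat < history.length + 1 := by omega
  have : m = ((m.toNat : Nat) : Int) := by omega
  rw [this, PySem.List.pyGet?_natCast]
  rw [List.getElem?_eq_getElem (by simpa using hm')]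
  simp only [Option.getD_some, List.getElem_map, List.getElem_range, Int.toNat_natCast]

-- binary search returns the least index satisfying the (monotone) test
theorem pvBS_least (pfx : List Int) (vi r : Int) :
    ∀ (fuel : Nat) (lo hi : Int), (hi - lo).toNat < fuel → lo ≤ r → r ≤ hi →
    (∀ k, lo ≤ k → k < r → ¬ (vi + 1 ≤ (PySem.List.pyGet? pfx (k + 1)).getD 0)) →
    (∀ k, r ≤ k → k ≤ hi → vi + 1 ≤ (PySem.List.pyGet? pfx (k + 1)).getD 0) →
    pvBS pfx vi fuel lo hi = r := by
  intro fuel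
  induction fuel with
  | zero => intro lo hi hN; omega
  | succ fuel ih =>
    intro lo hi hN hlor hrhi hlow hhigh
    by_cases h : lo < hi
    · rw [pvBS, if_pos h]
      have hmid := PySem.Int.floordiv_two_mid_bounds (le_of_lt h)
      have hmidlt : PySem.Int.floordiv (lo + hi) 2 < hi := by
        rw [PySem.Int.floordiv_eq_ediv_of_pos (by omega)]; omega
      set mid := PySem.Int.floordiv (lo + hi) 2 with hmiddef
      by_cases hP : vi + 1 ≤ (PySem.List.pyGet? pfx (mid + 1)).getD 0
      · rw [if_pos hP]
        have hrmid : r ≤ mid := by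
          by_contra hc
          exact hlow mid hmid.1 (by omega) hP
        exact ih lo mid (by omega) hlor hrmid hlow (fun k hk1 hk2 => hhigh k hk1 (by omega))
      · rw [if_neg hP]
        have hmidr : mid < r := by
          by_contra hc
          exact hP (hhigh mid (by omega) (by omega))
        exact ih (mid + 1) hi (by omega) (by omega) hrhi
          (fun k hk1 hk2 => hlow k (by omega) hk2) hhigh
    · rw [pvBS, if_neg h]; omega

-- pvCnt of the full list is the number of visible items
theorem pvCnt_full (history : List (List (String × String))) :
    pvCnt history history.length =
      ((history.filter (fun item => pvRoleGet item ≠ some "system")).length : Int) := by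
  simp [pvCnt]

-- ===== VERDICT =====
theorem visible_index_to_real_index_spec : Claim_equal_visible_index_to_real_index := by
  intro history vi _hdom hpre
  obtain ⟨h0, hlt⟩ := hpre
  unfold Spec_visible_index_to_real_index visible_index_to_real_index visible_index_to_real_index_alt
  have hlenV : ((pvVisFrom history 0).length : Int) =
      ((history.filter (fun item => pvRoleGet item ≠ some "system")).length : Int) := by
    rw [pvVisFrom_length]
  have hjlt : vi.toNat < (pvVisFrom history 0).length := by omega
  obtain ⟨hr0, hrn, hcr, hcr1⟩ := pvVis_main history 0 vi.toNat hjlt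
  set r := (pvVisFrom history 0).getD vi.toNat 0 with hrdef
  simp only [Int.sub_zero, zero_add] at hr0 hrn hcr hcr1
  have hvieq : ((vi.toNat : Nat) : Int) = vi := by omega
  rw [hvieq] at hcr hcr1
  -- A's side
  have hA : pvAGo (PySem.List.enumerate history 0) (-1) vi = r := by
    have := pvAGo_eq history 0 (-1) vi (by omega) (by omega)
    have hidx : (vi - (-1) - 1).toNat = vi.toNat := by omega
    rw [hidx] at this
    exact this
  -- B's side: the range check passes
  have hc2 : (pvPrefix history).2 =
      ((history.filter (fun item => pvRoleGet item ≠ some "system")).length : Int) := by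
    rw [pvPrefix_spec]; exact pvCnt_full history
  rw [hA]
  rw [if_neg (by rw [hc2]; omega)]
  -- the binary search returns r
  symm
  apply pvBS_least (pvPrefix history).1 vi r history.length 0 ((history.length : Int) - 1)
    (by omega) hr0 (by omega)
  · intro k hk1 hk2
    rw [pvPrefix_get history (k + 1) (by omega) (by omega)]
    have hk1' : (k + 1).toNat ≤ r.toNat := by omega
    have hmono := pvCnt_mono history hk1'
    omega
  · intro k hk1 hk2
    rw [pvPrefix_get history (k + 1) (by omega) (by omega)]
    have hk1' : r.toNat + 1 ≤ (k + 1).toNat := by omega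
    have hmono := pvCnt_mono history hk1'
    omega
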